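-- pv_equiv track=rewrite | github.com/Kostanios/determination-of-distance-from-stereo-image | normalSSD.py | calculate_sigma_delta_pow
-- ===== SOURCE A (Python) =====
-- def calculate_sigma_delta_pow(
--         x_size,
--         y_size,
--         first_image_part,
--         second_image_part,
--         first_image_part_current_i,
--         second_image_part_current_i):
--     #
--     # calculate sum pow of delta between pixels end current i
--     #
--     first_i_sigma_delta_pow = 0
--     second_i_sigma_delta_pow = 0
--
--     x = 0
--     while x < x_size:
--         y = 0
--         while y < y_size:
--             first_image_pixel = first_image_part[x][y]
--             second_image_pixel = second_image_part[x][y]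
--
--             first_i = int(first_image_pixel[0]) + int(first_image_pixel[1]) + int(first_image_pixel[2])
--             second_i = int(second_image_pixel[0]) + int(second_image_pixel[1]) + int(second_image_pixel[2])
--
--             first_i_sigma_delta_pow = first_i_sigma_delta_pow + pow(first_image_part_current_i - first_i, 2)
--             second_i_sigma_delta_pow = second_i_sigma_delta_pow + pow(second_image_part_current_i - second_i, 2)
--
--             y += 1
--         x += 1
--
--     return [first_i_sigma_delta_pow, second_i_sigma_delta_pow]
-- ===== SOURCE B (Python) =====
-- def calculate_sigma_delta_pow(
--         x_size,
--         y_size,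
--         first_image_part,
--         second_image_part,
--         first_image_part_current_i,
--         second_image_part_current_i):
--     # One pass accumulating pixel count N, intensity sums S and squared-intensity
--     # sums Q; combine at the end via sum((c-i)^2) = c*c*N - 2*c*S + Q (exact in ints).
--     n = 0
--     s1 = q1 = s2 = q2 = 0
--     for x in range(x_size):
--         for y in range(y_size):
--             p1 = first_image_part[x][y]
--             p2 = second_image_part[x][y]
--             i1 = int(p1[0]) + int(p1[1]) + int(p1[2])
--             i2 = int(p2[0]) + int(p2[1]) + int(p2[2])
--             n += 1
--             s1 += i1
--             q1 += i1 * i1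
--             s2 += i2
--             q2 += i2 * i2
--     c1 = first_image_part_current_i
--     c2 = second_image_part_current_i
--     return [c1 * c1 * n - 2 * c1 * s1 + q1, c2 * c2 * n - 2 * c2 * s2 + q2]
-- ===== Notes on version B (the rewrite author's own statement) =====
-- stated objective: alternative
-- what changed: Instead of accumulating a running sum of squared deltas per pixel, B makes one pass accumulating the pixel count N, intensity sums S and squared-intensity sums Q for each image and combines them at the end with the exact integer identity sum((c-i)^2) = c*c*N - 2*c*S + Q.
import Mathlib
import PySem

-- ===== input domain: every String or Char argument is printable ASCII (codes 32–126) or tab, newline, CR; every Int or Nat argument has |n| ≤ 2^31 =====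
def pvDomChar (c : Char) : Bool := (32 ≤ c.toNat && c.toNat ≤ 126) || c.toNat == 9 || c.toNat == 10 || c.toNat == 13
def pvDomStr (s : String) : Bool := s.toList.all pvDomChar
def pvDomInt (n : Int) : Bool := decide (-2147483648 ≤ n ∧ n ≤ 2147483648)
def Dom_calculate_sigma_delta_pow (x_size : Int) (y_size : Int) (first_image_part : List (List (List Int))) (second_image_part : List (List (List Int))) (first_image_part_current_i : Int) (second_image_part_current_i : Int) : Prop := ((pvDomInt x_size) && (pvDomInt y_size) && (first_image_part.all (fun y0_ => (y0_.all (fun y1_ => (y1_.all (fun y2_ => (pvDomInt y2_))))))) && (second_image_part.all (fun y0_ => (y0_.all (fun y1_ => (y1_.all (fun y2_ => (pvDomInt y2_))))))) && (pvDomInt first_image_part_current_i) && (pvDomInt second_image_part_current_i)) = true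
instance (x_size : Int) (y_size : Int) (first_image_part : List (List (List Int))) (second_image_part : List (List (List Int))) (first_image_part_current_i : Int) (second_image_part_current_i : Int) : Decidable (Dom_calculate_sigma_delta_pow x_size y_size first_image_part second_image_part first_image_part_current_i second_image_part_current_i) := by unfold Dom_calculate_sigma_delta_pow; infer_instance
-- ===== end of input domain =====

-- B replaces A's running sum of squared deltas by one pass over count/sum/sum-of-squares
-- accumulators combined by the identity Σ(c−i)² = N·c² − 2c·S + Q (alternative decomposition, exact integer arithmetic).

-- ===== PORT A =====
-- intensity of a pixel: int(p[0]) + int(p[1]) + int(p[2]); Pre_ guarantees the indices are in range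
def pvIntensity (p : List Int) : Int :=
  (PySem.List.pyGet? p 0).getD 0 + (PySem.List.pyGet? p 1).getD 0 + (PySem.List.pyGet? p 2).getD 0

-- inner 'while y < y_size' loop of A
def pvALoopY (row1 row2 : List (List Int)) (c1 c2 y_size y acc1 acc2 : Int) : Int × Int :=
  if _h : y < y_size then
    let p1 := (PySem.List.pyGet? row1 y).getD []
    let p2 := (PySem.List.pyGet? row2 y).getD []
    pvALoopY row1 row2 c1 c2 y_size (y + 1)
      (acc1 + (c1 - pvIntensity p1) ^ 2) (acc2 + (c2 - pvIntensity p2) ^ 2)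
  else (acc1, acc2)
termination_by (y_size - y).toNat
decreasing_by omega

-- outer 'while x < x_size' loop of A
def pvALoopX (fip sip : List (List (List Int))) (c1 c2 x_size y_size x acc1 acc2 : Int) : Int × Int :=
  if _h : x < x_size then
    let row1 := (PySem.List.pyGet? fip x).getD []
    let row2 := (PySem.List.pyGet? sip x).getD []
    let r := pvALoopY row1 row2 c1 c2 y_size 0 acc1 acc2
    pvALoopX fip sip c1 c2 x_size y_size (x + 1) r.1 r.2
  else (acc1, acc2)
termination_by (x_size - x).toNat
decreasing_by omega

def calculate_sigma_delta_pow (x_size : Int) (y_size : Int) (first_image_part : List (List (List Int))) (second_image_part : List (List (List Int))) (first_image_part_current_i : Int) (second_image_part_current_i : Int) : List Int :=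
  let r := pvALoopX first_image_part second_image_part first_image_part_current_i second_image_part_current_i x_size y_size 0 0 0
  [r.1, r.2]

-- ===== PORT B =====
-- state (n, s1, q1, s2, q2): pixel count, intensity sums and squared-intensity sums;
-- pixels are fetched first_image_part[x][y] inside the inner loop, as in Source B
def pvBStep (fip sip : List (List (List Int))) (x : Int) (st : Int × Int × Int × Int × Int) (y : Int) : Int × Int × Int × Int × Int :=
  let i1 := pvIntensity ((PySem.List.pyGet? ((PySem.List.pyGet? fip x).getD []) y).getD [])
  let i2 := pvIntensity ((PySem.List.pyGet? ((PySem.List.pyGet? sip x).getD []) y).getD [])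
  (st.1 + 1, st.2.1 + i1, st.2.2.1 + i1 * i1, st.2.2.2.1 + i2, st.2.2.2.2 + i2 * i2)

-- body of 'for x in range(x_size)': inner 'for y in range(y_size)' fold
def pvBRow (fip sip : List (List (List Int))) (y_size : Int) (st : Int × Int × Int × Int × Int) (x : Int) : Int × Int × Int × Int × Int :=
  (PySem.List.pyRange 0 y_size 1).foldl (pvBStep fip sip x) st

def calculate_sigma_delta_pow_alt (x_size : Int) (y_size : Int) (first_image_part : List (List (List Int))) (second_image_part : List (List (List Int))) (first_image_part_current_i : Int) (second_image_part_current_i : Int) : List Int :=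
  let st := (PySem.List.pyRange 0 x_size 1).foldl (pvBRow first_image_part second_image_part y_size) (0, 0, 0, 0, 0)
  let c1 := first_image_part_current_i
  let c2 := second_image_part_current_i
  [c1 * c1 * st.1 - 2 * c1 * st.2.1 + st.2.2.1,
   c2 * c2 * st.1 - 2 * c2 * st.2.2.2.1 + st.2.2.2.2]

-- ===== PRECONDITION & SPEC =====
-- Pre_ excludes exactly the inputs on which A raises IndexError: when both loop bounds are
-- positive, the first x_size rows must exist in both images, each have at least y_size pixels,
-- and each touched pixel at least 3 channels; when x_size <= 0 or y_size <= 0 no pixel is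
-- indexed, so nothing is excluded there.
def Pre_calculate_sigma_delta_pow (x_size : Int) (y_size : Int) (first_image_part : List (List (List Int))) (second_image_part : List (List (List Int))) (first_image_part_current_i : Int) (second_image_part_current_i : Int) : Prop :=
  0 < x_size → 0 < y_size →
  (x_size.toNat ≤ first_image_part.length ∧ x_size.toNat ≤ second_image_part.length ∧
   (∀ r ∈ first_image_part.take x_size.toNat, y_size.toNat ≤ r.length ∧ ∀ p ∈ r.take y_size.toNat, 3 ≤ p.length) ∧
   (∀ r ∈ second_image_part.take x_size.toNat, y_size.toNat ≤ r.length ∧ ∀ p ∈ r.take y_size.toNat, 3 ≤ p.length))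
instance (x_size : Int) (y_size : Int) (first_image_part : List (List (List Int))) (second_image_part : List (List (List Int))) (first_image_part_current_i : Int) (second_image_part_current_i : Int) : Decidable (Pre_calculate_sigma_delta_pow x_size y_size first_image_part second_image_part first_image_part_current_i second_image_part_current_i) := by unfold Pre_calculate_sigma_delta_pow; infer_instance

def pvWitness_calculate_sigma_delta_pow : Int × Int × List (List (List Int)) × List (List (List Int)) × Int × Int :=
  (1, 2, [[[1, 2, 3], [4, 5, 6]]], [[[0, 1, 2], [3, 4, 5]]], 10, 20)

def Spec_calculate_sigma_delta_pow (x_size : Int) (y_size : Int) (first_image_part : List (List (List Int))) (second_image_part : List (List (List Int))) (first_image_part_current_i : Int) (second_image_part_current_i : Int) (out : List Int) : Prop := out = calculate_sigma_delta_pow_alt x_size y_size first_image_part second_image_part first_image_part_current_i second_image_part_current_i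
instance (x_size : Int) (y_size : Int) (first_image_part : List (List (List Int))) (second_image_part : List (List (List Int))) (first_image_part_current_i : Int) (second_image_part_current_i : Int) (out : List Int) : Decidable (Spec_calculate_sigma_delta_pow x_size y_size first_image_part second_image_part first_image_part_current_i second_image_part_current_i out) := by unfold Spec_calculate_sigma_delta_pow; infer_instance

-- ===== CLAIM (what is proved, stated in full; the proofs are below) =====
def Claim_equal_calculate_sigma_delta_pow : Prop := ∀ (x_size : Int) (y_size : Int) (first_image_part : List (List (List Int))) (second_image_part : List (List (List Int))) (first_image_part_current_i : Int) (second_image_part_current_i : Int), Dom_calculate_sigma_delta_pow x_size y_size first_image_part second_image_part first_image_part_current_i second_image_part_current_i → Pre_calculate_sigma_delta_pow x_size y_size first_image_part second_image_part first_image_part_current_i second_image_part_current_i → Spec_calculate_sigma_delta_pow x_size y_size first_image_part second_image_part first_image_part_current_i second_image_part_current_i (calculate_sigma_delta_pow x_size y_size first_image_part second_image_part first_image_part_current_i second_image_part_current_i)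

-- ===== LEMMAS AND PROOFS =====

theorem pvWitness_ok :
    Dom_calculate_sigma_delta_pow (pvWitness_calculate_sigma_delta_pow.1) (pvWitness_calculate_sigma_delta_pow.2.1) (pvWitness_calculate_sigma_delta_pow.2.2.1) (pvWitness_calculate_sigma_delta_pow.2.2.2.1) (pvWitness_calculate_sigma_delta_pow.2.2.2.2.1) (pvWitness_calculate_sigma_delta_pow.2.2.2.2.2) ∧
    Pre_calculate_sigma_delta_pow (pvWitness_calculate_sigma_delta_pow.1) (pvWitness_calculate_sigma_delta_pow.2.1) (pvWitness_calculate_sigma_delta_pow.2.2.1) (pvWitness_calculate_sigma_delta_pow.2.2.2.1) (pvWitness_calculate_sigma_delta_pow.2.2.2.2.1) (pvWitness_calculate_sigma_delta_pow.2.2.2.2.2) := by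
  decide

-- componentwise addition on B's accumulator state
def pvStAdd (a b : Int × Int × Int × Int × Int) : Int × Int × Int × Int × Int :=
  (a.1 + b.1, a.2.1 + b.2.1, a.2.2.1 + b.2.2.1, a.2.2.2.1 + b.2.2.2.1, a.2.2.2.2 + b.2.2.2.2)

theorem pvBStep_shift (fip sip : List (List (List Int))) (x : Int) (a b : Int × Int × Int × Int × Int) (y : Int) :
    pvBStep fip sip x (pvStAdd a b) y = pvStAdd (pvBStep fip sip x a y) b := by
  simp only [pvBStep, pvStAdd, Prod.mk.injEq]
  refine ⟨by ring, by ring, by ring, by ring, by ring⟩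

theorem pvFoldl_shift (fip sip : List (List (List Int))) (x : Int) (l : List Int) :
    ∀ a b, l.foldl (pvBStep fip sip x) (pvStAdd a b) = pvStAdd (l.foldl (pvBStep fip sip x) a) b := by
  induction l with
  | nil => intro a b; rfl
  | cons y l ih =>
      intro a b
      simp only [List.foldl_cons, pvBStep_shift, ih]

theorem pvRow_shift (fip sip : List (List (List Int))) (y_size : Int) (l : List Int) :
    ∀ a b, l.foldl (pvBRow fip sip y_size) (pvStAdd a b) = pvStAdd (l.foldl (pvBRow fip sip y_size) a) b := by
  induction l with
  | nil => intro a b; rfl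
  | cons x l ih =>
      intro a b
      simp only [List.foldl_cons, pvBRow, pvFoldl_shift, ih]

-- A's inner loop expressed through B's inner fold
theorem pvInner_eq (fip sip : List (List (List Int))) (x c1 c2 y_size : Int) :
    ∀ (n : ℕ) (y acc1 acc2 : Int), (y_size - y).toNat = n →
      pvALoopY ((PySem.List.pyGet? fip x).getD []) ((PySem.List.pyGet? sip x).getD []) c1 c2 y_size y acc1 acc2 =
        (let F := (PySem.List.pyRange y y_size 1).foldl (pvBStep fip sip x) (0, 0, 0, 0, 0)
         (acc1 + (c1 * c1 * F.1 - 2 * c1 * F.2.1 + F.2.2.1),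
          acc2 + (c2 * c2 * F.1 - 2 * c2 * F.2.2.2.1 + F.2.2.2.2))) := by
  intro n
  induction n with
  | zero =>
      intro y acc1 acc2 h
      have hy : ¬ y < y_size := by omega
      rw [pvALoopY, PySem.List.pyRange_one_eq_nil (by omega)]
      simp [hy]
  | succ n ih =>
      intro y acc1 acc2 h
      have hy : y < y_size := by omega
      rw [pvALoopY]
      simp only [hy, dif_pos, reduceDIte]
      rw [ih (y + 1) _ _ (by omega)]
      rw [PySem.List.pyRange_one_cons hy]
      simp only [List.foldl_cons]
      have hstep : pvBStep fip sip x (0, 0, 0, 0, 0) y =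
          pvStAdd (0, 0, 0, 0, 0) (pvBStep fip sip x (0, 0, 0, 0, 0) y) := by
        simp [pvStAdd]
      rw [hstep, pvFoldl_shift]
      simp only [pvStAdd, pvBStep, Prod.mk.injEq]
      constructor <;> ring

-- A's outer loop expressed through B's outer fold
theorem pvOuter_eq (fip sip : List (List (List Int))) (c1 c2 x_size y_size : Int) :
    ∀ (n : ℕ) (x acc1 acc2 : Int), (x_size - x).toNat = n →
      pvALoopX fip sip c1 c2 x_size y_size x acc1 acc2 =
        (let F := (PySem.List.pyRange x x_size 1).foldl (pvBRow fip sip y_size) (0, 0, 0, 0, 0)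
         (acc1 + (c1 * c1 * F.1 - 2 * c1 * F.2.1 + F.2.2.1),
          acc2 + (c2 * c2 * F.1 - 2 * c2 * F.2.2.2.1 + F.2.2.2.2))) := by
  intro n
  induction n with
  | zero =>
      intro x acc1 acc2 h
      have hx : ¬ x < x_size := by omega
      rw [pvALoopX, PySem.List.pyRange_one_eq_nil (by omega)]
      simp [hx]
  | succ n ih =>
      intro x acc1 acc2 h
      have hx : x < x_size := by omega
      rw [pvALoopX]
      simp only [hx, dif_pos, reduceDIte]
      rw [pvInner_eq fip sip x c1 c2 y_size (y_size - 0).toNat 0 acc1 acc2 rfl]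
      rw [ih (x + 1) _ _ (by omega)]
      rw [PySem.List.pyRange_one_cons hx]
      simp only [List.foldl_cons]
      have hstep : pvBRow fip sip y_size (0, 0, 0, 0, 0) x =
          pvStAdd (0, 0, 0, 0, 0) (pvBRow fip sip y_size (0, 0, 0, 0, 0) x) := by
        simp [pvStAdd, Prod.ext_iff]
      rw [hstep, pvRow_shift]
      simp only [pvStAdd, pvBRow, Prod.mk.injEq]
      constructor <;> ring

-- ===== VERDICT (by name: the statement is the Claim_ definition above) =====
theorem calculate_sigma_delta_pow_spec : Claim_equal_calculate_sigma_delta_pow := by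
  intro x_size y_size fip sip c1 c2 _hDom _hPre
  unfold Spec_calculate_sigma_delta_pow calculate_sigma_delta_pow calculate_sigma_delta_pow_alt
  rw [pvOuter_eq fip sip c1 c2 x_size y_size (x_size - 0).toNat 0 0 0 rfl]
  simp only [List.cons.injEq, and_true]
  constructor <;> ring
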